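-- pv_equiv track=rewrite | github.com/zinozino1/Algorithm_PS | 프로그래머스/Py/LV2. 없는 숫자 더하기.py | solution
-- ===== SOURCE A (Python) =====
-- def solution(numbers):
--     res = 0
--     numbers.sort()
--     if len(numbers) == 1:
--         return 45-numbers[0]
--
--     for i, n in enumerate(numbers):
--         diff = 0
--         if i == 0:
--             if n != 0:
--                 diff = n
--                 for j in range(diff):
--                     res += j
--
--         else:
--             if i == len(numbers) - 1:
--                 if n != 9:
--                     diff = 9-n
--                     prev = n+1
--                     for j in range(diff):
--                         res += prev
--                         prev += 1
--
--             if numbers[i-1] + 1 != n: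
--                 diff = n - numbers[i-1]
--                 prev = numbers[i-1] + 1
--                 for j in range(diff-1):
--                     res += prev
--                     prev += 1
--
--     return res
-- ===== SOURCE B (Python) =====
-- def solution(numbers):
--     # sum of the digits 0..9 missing from numbers, via closed-form (Gauss) sums of
--     # the three kinds of gaps in the sorted list: below the minimum, between
--     # consecutive elements, above the maximum.  No per-digit counting loops.
--     s = sorted(numbers)
--     if len(s) <= 1:
--         return 45 - sum(s)
--     res = 0
--     a = s[0]
--     if a > 0:
--         res += a * (a - 1) // 2              # 0 + 1 + ... + (a-1)
--     b = s[-1]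
--     if b < 9:
--         res += (9 - b) * (b + 10) // 2       # (b+1) + ... + 9
--     for x, y in zip(s, s[1:]):
--         if y > x + 1:
--             res += (y - 1 - x) * (x + y) // 2   # (x+1) + ... + (y-1)
--     return res
-- ===== Notes on version B (the rewrite author's own statement) =====
-- stated objective: faster
-- what changed: B replaces A's element-by-element counting loops over each run of missing integers (below the minimum, between consecutive sorted elements, above the maximum) with one closed-form Gauss sum per gap, and folds the gap scan over adjacent pairs (zip) instead of enumerate with index lookups.
-- intended difference: On the empty list A returns 0 because its gap scan never runs, while B returns 45, the intended sum of all ten missing digits 0..9. — e.g. on solution([]): A returns 0, B returns 45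
import Mathlib
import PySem

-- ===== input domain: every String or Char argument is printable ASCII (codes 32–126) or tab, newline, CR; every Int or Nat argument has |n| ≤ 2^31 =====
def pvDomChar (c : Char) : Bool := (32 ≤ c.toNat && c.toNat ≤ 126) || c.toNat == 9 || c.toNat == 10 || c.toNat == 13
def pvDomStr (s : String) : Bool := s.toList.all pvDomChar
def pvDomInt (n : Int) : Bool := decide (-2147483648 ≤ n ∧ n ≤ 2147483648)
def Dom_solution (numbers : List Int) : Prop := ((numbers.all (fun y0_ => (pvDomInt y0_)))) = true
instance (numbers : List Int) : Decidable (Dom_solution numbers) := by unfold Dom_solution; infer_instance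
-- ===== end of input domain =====

-- B replaces A's per-number counting loops over each gap of the sorted list by closed-form
-- (Gauss) sums, one formula per gap.  Note: Python A sorts its argument in place; the
-- equivalence proved here is about the return value only (B does not mutate its argument).

-- ===== PORT A =====
-- the body of A after `numbers.sort()` (A sorts in place, then runs exactly this)
def solCore (numbers : List Int) : Int :=
  if numbers.length = 1 then
    45 - PySem.List.pyGetD numbers 0 0   -- numbers[0]; in range since length = 1
  else
    (PySem.List.enumerate numbers).foldl (fun res (p : Int × Int) =>
      if p.1 = 0 then
        (if p.2 ≠ 0 then
          -- diff = n; for j in range(diff): res += j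
          (PySem.List.pyRange 0 p.2 1).foldl (fun r j => r + j) res
        else res)
      else
        let res :=
          if p.1 = (numbers.length : Int) - 1 then
            (if p.2 ≠ 9 then
              -- diff = 9-n; prev = n+1; for j in range(diff): res += prev; prev += 1
              ((PySem.List.pyRange 0 (9 - p.2) 1).foldl
                (fun (rp : Int × Int) (_ : Int) => (rp.1 + rp.2, rp.2 + 1)) (res, p.2 + 1)).1
            else res)
          else res
        let prevN := PySem.List.pyGetD numbers (p.1 - 1) 0  -- numbers[i-1]; in range since i ≥ 1 here
        if prevN + 1 ≠ p.2 then
          -- diff = n - numbers[i-1]; prev = numbers[i-1]+1; for j in range(diff-1): res += prev; prev += 1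
          ((PySem.List.pyRange 0 (p.2 - prevN - 1) 1).foldl
            (fun (rp : Int × Int) (_ : Int) => (rp.1 + rp.2, rp.2 + 1)) (res, prevN + 1)).1
        else res) 0

def solution (numbers : List Int) : Int :=
  solCore (PySem.List.sorted numbers (fun x => x) false)

-- ===== PORT B =====
def solution_alt (numbers : List Int) : Int :=
  let s := PySem.List.sorted numbers (fun x => x) false
  if s.length ≤ 1 then
    45 - s.sum
  else
    let res : Int := 0
    let a := PySem.List.pyGetD s 0 0                      -- s[0]; in range since s nonempty here
    let res := if a > 0 then res + PySem.Int.floordiv (a * (a - 1)) 2 else res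
    let b := PySem.List.pyGetD s (-1) 0                   -- s[-1]; in range since s nonempty here
    let res := if b < 9 then res + PySem.Int.floordiv ((9 - b) * (b + 10)) 2 else res
    (s.zip (PySem.List.slice s (some 1) none)).foldl      -- zip(s, s[1:])
      (fun r (xy : Int × Int) =>
        if xy.2 > xy.1 + 1 then r + PySem.Int.floordiv ((xy.2 - 1 - xy.1) * (xy.1 + xy.2)) 2
        else r) res

-- ===== PRECONDITION & SPEC =====
-- On the empty list A returns 0 (its gap scan never runs), but the task is 'sum of the
-- digits 0..9 missing from numbers', so the intended value there is 0+1+...+9 = 45, which B returns.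
def D_solution (numbers : List Int) : Prop := numbers = []
instance (numbers : List Int) : Decidable (D_solution numbers) := by unfold D_solution; infer_instance
def Spec_solution (numbers : List Int) (out : Int) : Prop := ¬ D_solution numbers → out = solution_alt numbers
instance (numbers : List Int) (out : Int) : Decidable (Spec_solution numbers out) := by unfold Spec_solution; infer_instance
def pvDiffWitness_solution : List Int := []
def pvDiffWitnessOut_solution : Int × Int := (0, 45)

-- ===== CLAIM (what is proved, stated in full; the proofs are below) =====
def Claim_unchanged_solution : Prop := ∀ (numbers : List Int), Dom_solution numbers → Spec_solution numbers (solution numbers)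
def Claim_changed_solution : Prop := Dom_solution (pvDiffWitness_solution) ∧ D_solution (pvDiffWitness_solution) ∧ solution (pvDiffWitness_solution) = pvDiffWitnessOut_solution.1 ∧ solution_alt (pvDiffWitness_solution) = pvDiffWitnessOut_solution.2 ∧ pvDiffWitnessOut_solution.1 ≠ pvDiffWitnessOut_solution.2
def Claim_exact_solution : Prop := ∀ (numbers : List Int), Dom_solution numbers → D_solution numbers → solution numbers ≠ solution_alt numbers

-- ===== LEMMAS AND PROOFS =====

-- sum of the d consecutive integers p, p+1, …, p+d-1
def sumc (p : Int) : Nat → Int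
  | 0 => 0
  | d + 1 => sumc p d + (p + d)

theorem two_sumc (p : Int) (d : Nat) : 2 * sumc p d = d * (2 * p + d - 1) := by
  induction d with
  | zero => simp [sumc]
  | succ k ih =>
    show 2 * (sumc p k + (p + k)) = _
    rw [mul_add, ih]
    push_cast
    ring

def headc (n : Int) : Int := sumc 0 n.toNat
def lastc (n : Int) : Int := sumc (n + 1) (9 - n).toNat
def gapc (x y : Int) : Int := sumc (x + 1) (y - x - 1).toNat

def gapSum : List Int → Int
  | x :: y :: t => gapc x y + gapSum (y :: t)
  | _ => 0

-- closed forms of A's inner counting loops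
theorem pairFold (d : Nat) (res p : Int) :
    (PySem.List.pyRange 0 (d : Int) 1).foldl
      (fun (rp : Int × Int) (_ : Int) => (rp.1 + rp.2, rp.2 + 1)) (res, p)
      = (res + sumc p d, p + d) := by
  induction d generalizing res p with
  | zero => simp [sumc]
  | succ k ih =>
    have hc : ((k + 1 : Nat) : Int) = (k : Int) + 1 := by push_cast; ring
    rw [hc, PySem.List.pyRange_one_succ_right (by positivity), List.foldl_append, ih]
    simp only [List.foldl_cons, List.foldl_nil, sumc, Prod.mk.injEq]
    constructor
    · ring
    · push_cast
      ring

theorem pairFoldI (D res p : Int) :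
    ((PySem.List.pyRange 0 D 1).foldl
      (fun (rp : Int × Int) (_ : Int) => (rp.1 + rp.2, rp.2 + 1)) (res, p)).1
      = res + sumc p D.toNat := by
  by_cases h : D ≤ 0
  · rw [PySem.List.pyRange_one_eq_nil h, Int.toNat_of_nonpos h]
    simp [sumc]
  · rw [show D = (D.toNat : Int) from (Int.toNat_of_nonneg (by omega)).symm, pairFold]
    dsimp only
    rw [show (((D.toNat : Int)).toNat) = D.toNat from by omega]

theorem sumFold (d : Nat) (res : Int) :
    (PySem.List.pyRange 0 (d : Int) 1).foldl (fun r j => r + j) res = res + sumc 0 d := by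
  induction d generalizing res with
  | zero => simp [sumc]
  | succ k ih =>
    have hc : ((k + 1 : Nat) : Int) = (k : Int) + 1 := by push_cast; ring
    rw [hc, PySem.List.pyRange_one_succ_right (by positivity), List.foldl_append, ih]
    simp [sumc]
    ring

theorem sumFoldI (D res : Int) :
    (PySem.List.pyRange 0 D 1).foldl (fun r j => r + j) res = res + sumc 0 D.toNat := by
  by_cases h : D ≤ 0
  · rw [PySem.List.pyRange_one_eq_nil h, Int.toNat_of_nonpos h]
    simp [sumc]
  · rw [show D = (D.toNat : Int) from (Int.toNat_of_nonneg (by omega)).symm, sumFold]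
    rw [show (((D.toNat : Int)).toNat) = D.toNat from by omega]

-- degenerate gaps are empty
theorem headc_of_nonpos {a : Int} (h : a ≤ 0) : headc a = 0 := by
  unfold headc
  rw [Int.toNat_of_nonpos h]
  rfl
theorem lastc_of_ge {b : Int} (h : 9 ≤ b) : lastc b = 0 := by
  unfold lastc
  rw [Int.toNat_of_nonpos (by omega)]
  rfl
theorem gapc_of_le {x y : Int} (h : y ≤ x + 1) : gapc x y = 0 := by
  unfold gapc
  rw [Int.toNat_of_nonpos (by omega)]
  rfl

-- B's Gauss formulas compute the same gap sums
theorem half_two (y : Int) : PySem.Int.floordiv (2 * y) 2 = y := by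
  rw [PySem.Int.floordiv_eq_ediv_of_pos (by norm_num)]
  omega

theorem head_floordiv {a : Int} (h : 0 < a) :
    PySem.Int.floordiv (a * (a - 1)) 2 = headc a := by
  have h2 : a * (a - 1) = 2 * headc a := by
    unfold headc
    rw [two_sumc, Int.toNat_of_nonneg h.le]
    ring
  rw [h2, half_two]

theorem last_floordiv {b : Int} (h : b < 9) :
    PySem.Int.floordiv ((9 - b) * (b + 10)) 2 = lastc b := by
  have h2 : (9 - b) * (b + 10) = 2 * lastc b := by
    unfold lastc
    rw [two_sumc, Int.toNat_of_nonneg (by omega)]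
    ring
  rw [h2, half_two]

theorem gap_floordiv {x y : Int} (h : x + 1 < y) :
    PySem.Int.floordiv ((y - 1 - x) * (x + y)) 2 = gapc x y := by
  have h2 : (y - 1 - x) * (x + y) = 2 * gapc x y := by
    unfold gapc
    rw [two_sumc, Int.toNat_of_nonneg (by omega)]
    ring
  rw [h2, half_two]

-- per-element contribution of A's loop body
def cA (full : List Int) (p : Int × Int) : Int :=
  if p.1 = 0 then headc p.2
  else (if p.1 = (full.length : Int) - 1 then lastc p.2 else 0)
       + gapc (PySem.List.pyGetD full (p.1 - 1) 0) p.2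

theorem bodyA_eq (full : List Int) (res0 : Int) (p : Int × Int) :
    (fun res (p : Int × Int) =>
      if p.1 = 0 then
        (if p.2 ≠ 0 then
          (PySem.List.pyRange 0 p.2 1).foldl (fun r j => r + j) res
        else res)
      else
        let res :=
          if p.1 = (full.length : Int) - 1 then
            (if p.2 ≠ 9 then
              ((PySem.List.pyRange 0 (9 - p.2) 1).foldl
                (fun (rp : Int × Int) (_ : Int) => (rp.1 + rp.2, rp.2 + 1)) (res, p.2 + 1)).1
            else res)
          else res
        let prevN := PySem.List.pyGetD full (p.1 - 1) 0
        if prevN + 1 ≠ p.2 then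
          ((PySem.List.pyRange 0 (p.2 - prevN - 1) 1).foldl
            (fun (rp : Int × Int) (_ : Int) => (rp.1 + rp.2, rp.2 + 1)) (res, prevN + 1)).1
        else res) res0 p
    = res0 + cA full p := by
  unfold cA
  rcases p with ⟨i, n⟩
  dsimp only
  by_cases h0 : i = 0
  · simp only [h0, if_true]
    by_cases hn : n = 0
    · simp [hn, headc_of_nonpos]
    · rw [if_pos hn, sumFoldI]
      rfl
  · simp only [if_neg h0]
    set prevN := PySem.List.pyGetD full (i - 1) 0 with hp
    simp only [pairFoldI]
    split_ifs
    all_goals simp only [lastc, gapc]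
    all_goals (try rw [show ((9 : Int) - n).toNat = 0 from by omega])
    all_goals (try rw [show (n - prevN - 1).toNat = 0 from by omega])
    all_goals simp [sumc]
    all_goals ring

theorem foldl_funext {α β : Type} (f g : β → α → β) (h : ∀ b a, f b a = g b a)
    (l : List α) (init : β) : l.foldl f init = l.foldl g init := by
  have : f = g := funext fun b => funext (h b)
  rw [this]

-- the tail of A's enumerate-scan collects every internal gap plus the gap above the maximum
theorem tailA (t : List Int) : ∀ (full : List Int) (k : Nat) (p : Int), 1 ≤ k →
    full.drop (k - 1) = p :: t →
    ((PySem.List.enumerate t (k : Int)).map (cA full)).sum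
      = gapSum (p :: t)
        + (if t = [] then 0 else lastc ((p :: t).getLast (List.cons_ne_nil p t))) := by
  induction t with
  | nil =>
    intro full k p hk hdrop
    simp [PySem.List.enumerate_nil, gapSum]
  | cons y t' ih =>
    intro full k p hk hdrop
    have hlen : full.length = k + (y :: t').length := by
      have h1 : (full.drop (k - 1)).length = (p :: y :: t').length := by rw [hdrop]
      rw [List.length_drop] at h1
      simp only [List.length_cons] at h1 ⊢
      omega
    have hgetp : PySem.List.pyGetD full ((k : Int) - 1) 0 = p := by
      have h1 : ((k : Int) - 1) = ((k - 1 : Nat) : Int) := by omega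
      rw [h1, PySem.List.pyGetD_natCast]
      have h2 : full[k - 1]? = some p := by
        have h3 : (full.drop (k - 1))[0]? = full[k - 1 + 0]? := List.getElem?_drop ..
        rw [hdrop] at h3
        simpa using h3.symm
      simp [List.getD_eq_getElem?_getD, h2]
    have hdrop' : full.drop k = y :: t' := by
      have h1 : k = (k - 1) + 1 := by omega
      rw [h1, ← List.tail_drop, hdrop]
      rfl
    rw [PySem.List.enumerate_cons, List.map_cons, List.sum_cons,
      show ((k : Int) + 1) = ((k + 1 : Nat) : Int) from by push_cast; ring,
      ih full (k + 1) y (by omega) (by simpa using hdrop')]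
    have hcA : cA full ((k : Int), y)
        = (if t' = [] then lastc y else 0) + gapc p y := by
      unfold cA
      have hk0 : ((k : Int)) ≠ 0 := by omega
      rw [if_neg hk0]
      simp only [hgetp]
      by_cases ht : t' = []
      · have heq : ((k : Int)) = (full.length : Int) - 1 := by
          subst ht
          rw [hlen]
          simp only [List.length_cons, List.length_nil]
          push_cast
          ring
        simp [ht, heq]
      · have hne2 : ((k : Int)) ≠ (full.length : Int) - 1 := by
          have ht' : 0 < t'.length := List.length_pos_iff.mpr ht
          have h5 : full.length = k + t'.length + 1 := by
            rw [hlen]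
            simp only [List.length_cons]
            omega
          omega
        simp [ht, hne2]
    rw [hcA]
    show _ = gapc p y + gapSum (y :: t') + _
    by_cases ht : t' = []
    · subst ht
      simp [gapSum, List.getLast]
      ring
    · have hlast : (p :: y :: t').getLast (List.cons_ne_nil _ _)
          = (y :: t').getLast (List.cons_ne_nil _ _) := List.getLast_cons _
      simp only [if_neg ht, if_neg (List.cons_ne_nil y t'), hlast]
      ring

-- B's zip-scan collects exactly the internal gaps
theorem zipB (s : List Int) : ∀ (r : Int),
    (s.zip s.tail).foldl
      (fun r (xy : Int × Int) =>
        if xy.2 > xy.1 + 1 then r + PySem.Int.floordiv ((xy.2 - 1 - xy.1) * (xy.1 + xy.2)) 2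
        else r) r
    = r + gapSum s := by
  induction s with
  | nil => intro r; simp [gapSum]
  | cons x s' ih =>
    intro r
    cases s' with
    | nil => simp [gapSum]
    | cons y t =>
      show ((x, y) :: (y :: t).zip t).foldl _ r = _
      have htail : (y :: t).tail = t := rfl
      rw [List.foldl_cons]
      rw [show ((y :: t).zip t) = ((y :: t).zip (y :: t).tail) from by rw [htail], ih]
      show (if y > x + 1 then r + _ else r) + gapSum (y :: t) = r + (gapc x y + gapSum (y :: t))
      by_cases h : y > x + 1
      · rw [if_pos h, gap_floordiv (by omega)]
        ring
      · rw [if_neg h, gapc_of_le (by omega)]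
        ring

theorem cA_zero (full : List Int) (n : Int) : cA full (0, n) = headc n := by
  unfold cA
  simp

theorem unchanged_main (numbers : List Int) (hne : numbers ≠ []) :
    solution numbers = solution_alt numbers := by
  unfold solution solution_alt solCore
  dsimp only
  generalize hG : PySem.List.sorted numbers (fun x => x) false = s
  have hsne : s ≠ [] := by
    rw [← hG]
    intro h
    exact hne ((PySem.List.sorted_eq_nil_iff numbers (fun x => x) false).mp h)
  rcases s with _ | ⟨x, s'⟩
  · exact absurd rfl hsne
  rcases s' with _ | ⟨y, t⟩
  · simp [PySem.List.pyGetD_zero_cons]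
  · have hlen1 : ¬ (x :: y :: t).length = 1 := by simp
    have hlen2 : ¬ (x :: y :: t).length ≤ 1 := by simp
    rw [if_neg hlen1, if_neg hlen2]
    rw [foldl_funext _ _ (bodyA_eq (x :: y :: t)), PySem.List.foldl_add]
    rw [PySem.List.enumerate_cons, List.map_cons, List.sum_cons]
    rw [show ((0 : Int) + 1) = ((1 : Nat) : Int) from by norm_num]
    rw [tailA (y :: t) (x :: y :: t) 1 x (le_refl 1) (by simp)]
    rw [cA_zero, if_neg (List.cons_ne_nil y t)]
    rw [PySem.List.pyGetD_zero_cons,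
      PySem.List.pyGetD_neg_one (x :: y :: t) 0 (List.cons_ne_nil x (y :: t)),
      PySem.List.slice_from_one]
    have hz := zipB (x :: y :: t)
    simp only [List.tail_cons] at hz ⊢
    rw [hz]
    by_cases hx : x > 0
    · rw [if_pos hx, head_floordiv hx]
      by_cases hb : (x :: y :: t).getLast (List.cons_ne_nil x (y :: t)) < 9
      · rw [if_pos hb, last_floordiv hb]
        ring
      · rw [if_neg hb, lastc_of_ge (by omega)]
        ring
    · rw [if_neg hx, headc_of_nonpos (by omega)]
      by_cases hb : (x :: y :: t).getLast (List.cons_ne_nil x (y :: t)) < 9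
      · rw [if_pos hb, last_floordiv hb]
        ring
      · rw [if_neg hb, lastc_of_ge (by omega)]
        ring

-- ===== VERDICT (by name: the statement is the Claim_ definition above) =====
theorem solution_spec : Claim_unchanged_solution := by
  intro numbers _ hd
  exact unchanged_main numbers hd

theorem solution_changed : Claim_changed_solution := by
  unfold Claim_changed_solution
  decide

theorem solution_tight : Claim_exact_solution := by
  intro numbers _ hd
  have : numbers = [] := hd
  subst this
  decide
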